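-- pv_equiv track=rewrite | github.com/james5635/GeekForGeek-Data-Structure-and-Algorithm | sorting/hard/surpasser_count/solution.py | find_surpasser_binary_indexed_tree
-- ===== SOURCE A (Python) =====
-- def find_surpasser_binary_indexed_tree(arr):
--     """
--     Find surpasser count using Binary Indexed Tree.
--     Efficient for large value ranges.
--
--     Args:
--         arr: Input array
--
--     Returns:
--         list: Surpasser count for each element
--     """
--     if not arr:
--         return []
--
--     n = len(arr)
--
--     # Coordinate compression
--     sorted_unique = sorted(set(arr))
--     rank = {val: i + 1 for i, val in enumerate(sorted_unique)}
--     max_rank = len(sorted_unique)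
--
--     # Binary Indexed Tree
--     bit = [0] * (max_rank + 2)
--
--     def bit_update(index, delta=1):
--         """Update BIT at index."""
--         while index <= max_rank:
--             bit[index] += delta
--             index += index & -index
--
--     def bit_query(index):
--         """Query prefix sum up to index."""
--         result = 0
--         while index > 0:
--             result += bit[index]
--             index -= index & -index
--         return result
--
--     def bit_query_range(left, right):
--         """Query range [left, right]."""
--         return bit_query(right) - bit_query(left - 1)
--
--     # Process from right to left
--     result = [0] * n
--
--     for i in range(n - 1, -1, -1):
--         r = rank[arr[i]]
--         # Count elements greater than arr[i] (ranks > r)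
--         result[i] = bit_query_range(r + 1, max_rank)
--         bit_update(r)
--
--     return result
-- ===== SOURCE B (Python) =====
-- def find_surpasser_binary_indexed_tree(arr):
--     """Surpasser counts by a direct scan: for each position, count the
--     strictly greater elements to its right."""
--     return [sum(1 for y in arr[i + 1:] if y > v) for i, v in enumerate(arr)]
-- ===== Notes on version B (the rewrite author's own statement) =====
-- stated objective: simpler
-- what changed: Replaces the coordinate-compression + Binary-Indexed-Tree machinery (sorting, a rank dict, fenwick update/query loops) with a one-line direct scan that, for each position, counts the strictly greater elements to its right.
import Mathlib
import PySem

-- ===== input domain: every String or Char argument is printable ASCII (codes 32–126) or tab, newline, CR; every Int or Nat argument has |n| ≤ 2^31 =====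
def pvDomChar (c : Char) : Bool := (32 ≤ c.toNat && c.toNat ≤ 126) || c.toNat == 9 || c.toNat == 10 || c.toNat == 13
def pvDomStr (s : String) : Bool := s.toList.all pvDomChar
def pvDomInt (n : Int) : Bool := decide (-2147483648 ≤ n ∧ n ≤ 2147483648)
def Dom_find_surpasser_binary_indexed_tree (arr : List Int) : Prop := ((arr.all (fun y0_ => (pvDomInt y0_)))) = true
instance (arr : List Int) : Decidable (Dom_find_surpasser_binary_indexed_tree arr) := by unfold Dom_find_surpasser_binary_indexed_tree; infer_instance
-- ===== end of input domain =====

-- B replaces A's coordinate-compression + Binary-Indexed-Tree machinery with a direct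
-- quadratic scan counting, for each position, the strictly greater elements to its right
-- (objective: simpler; not faster).


-- ===== PORT A =====
-- 'index & -index' of the Python
def pyLowbit (index : Int) : Int := PySem.Int.band index (-index)

-- 'while index <= max_rank: bit[index] += delta; index += index & -index'  (delta is 1 at
-- every call site).  The while loop is totalized with fuel; the caller passes fuel
-- (max_rank - index + 1), enough iterations since index grows by at least 1 per step.
def bitUpdateGo (maxRank : Int) : Nat → List Int → Int → List Int
  | 0, bit, _ => bit
  | fuel+1, bit, index =>
    if index ≤ maxRank then
      bitUpdateGo maxRank fuel
        (PySem.List.pySetD bit index (PySem.List.pyGetD bit index 0 + 1))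
        (index + pyLowbit index)
    else bit

def bitUpdate (maxRank : Int) (bit : List Int) (index : Int) : List Int :=
  bitUpdateGo maxRank (maxRank - index + 1).toNat bit index

-- 'while index > 0: result += bit[index]; index -= index & -index'  (fuel: index shrinks
-- by at least 1 per step while positive).
def bitQueryGo : Nat → List Int → Int → Int → Int
  | 0, _, res, _ => res
  | fuel+1, bit, res, index =>
    if index > 0 then
      bitQueryGo fuel bit (res + PySem.List.pyGetD bit index 0) (index - pyLowbit index)
    else res

def bitQuery (bit : List Int) (index : Int) : Int :=
  bitQueryGo (index.toNat + 1) bit 0 index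

def bitQueryRange (bit : List Int) (left right : Int) : Int :=
  bitQuery bit right - bitQuery bit (left - 1)

-- rank[arr[i]] is looked up with getD 0: the key is always present (arr[i] ∈ sorted_unique),
-- so the default is never used; likewise arr[i] with 0 ≤ i < len(arr) is always in range.
def find_surpasser_binary_indexed_tree (arr : List Int) : List Int :=
  if arr = [] then []
  else
    let n : Nat := arr.length
    let sortedUnique := PySem.List.sorted (PySem.Set.ofList arr) (fun x => x) false
    let rank := (PySem.List.enumerate sortedUnique 0).foldl
      (fun d p => d.insert p.2 (p.1 + 1)) PySem.Dict.empty
    let maxRank : Int := sortedUnique.length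
    let bit0 := List.replicate (maxRank.toNat + 2) (0 : Int)
    let loop : List Int × List Int → Int → List Int × List Int := fun st i =>
      let r := rank.getD (PySem.List.pyGetD arr i 0) 0
      let q := bitQueryRange st.1 (r + 1) maxRank
      (bitUpdate maxRank st.1 r, PySem.List.pySetD st.2 i q)
    ((PySem.List.pyRange ((n : Int) - 1) (-1) (-1)).foldl loop
      (bit0, List.replicate n (0 : Int))).2

-- ===== PORT B =====
-- '[sum(1 for y in arr[i+1:] if y > v) for i, v in enumerate(arr)]'
def find_surpasser_binary_indexed_tree_alt (arr : List Int) : List Int :=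
  (PySem.List.enumerate arr 0).map (fun p =>
    (PySem.List.slice arr (some (p.1 + 1)) none).foldl
      (fun acc y => if p.2 < y then acc + 1 else acc) 0)

-- ===== PRECONDITION & SPEC =====
def Spec_find_surpasser_binary_indexed_tree (arr : List Int) (out : List Int) : Prop := out = find_surpasser_binary_indexed_tree_alt arr
instance (arr : List Int) (out : List Int) : Decidable (Spec_find_surpasser_binary_indexed_tree arr out) := by unfold Spec_find_surpasser_binary_indexed_tree; infer_instance

-- ===== CLAIM (what is proved, stated in full; the proofs are below) =====
def Claim_equal_find_surpasser_binary_indexed_tree : Prop := ∀ (arr : List Int), Dom_find_surpasser_binary_indexed_tree arr → Spec_find_surpasser_binary_indexed_tree arr (find_surpasser_binary_indexed_tree arr)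

-- ===== LEMMAS AND PROOFS =====

def lowb (n : Nat) : Nat := n - (n &&& (n-1))

theorem land_odd (k : Nat) : (2*k+1) &&& (2*k) = 2*k := by
  apply Nat.eq_of_testBit_eq
  intro i
  rw [Nat.testBit_land]
  cases i with
  | zero => simp [Nat.testBit_zero, Nat.mul_add_mod, Nat.mul_mod_right]
  | succ j =>
      simp [Nat.testBit_add_one, Nat.mul_add_div (by norm_num : 0 < 2),
        Nat.mul_div_cancel_left _ (by norm_num : 0 < 2)]

theorem land_even (m : Nat) (h : 0 < m) : (2*m) &&& (2*m-1) = 2*(m &&& (m-1)) := by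
  apply Nat.eq_of_testBit_eq
  intro i
  rw [Nat.testBit_land]
  cases i with
  | zero => simp [Nat.testBit_zero, Nat.mul_mod_right]
  | succ j =>
      have h1 : 2*m/2 = m := Nat.mul_div_cancel_left _ (by norm_num)
      have h2 : (2*m-1)/2 = m-1 := by omega
      have h3 : 2*(m &&& (m-1))/2 = m &&& (m-1) := Nat.mul_div_cancel_left _ (by norm_num)
      simp [Nat.testBit_add_one, Nat.testBit_land, h1, h2, h3]

theorem lowb_odd (k : Nat) : lowb (2*k+1) = 1 := by
  unfold lowb
  rw [show 2*k+1-1 = 2*k by omega, land_odd]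
  omega

theorem lowb_two_mul (m : Nat) (h : 0 < m) : lowb (2*m) = 2 * lowb m := by
  unfold lowb
  rw [land_even m h]
  have : m &&& (m-1) ≤ m := Nat.and_le_left
  omega

theorem lowb_odd_mul_pow (k a : Nat) : lowb ((2*k+1) * 2^a) = 2^a := by
  induction a with
  | zero => simpa using lowb_odd k
  | succ b ih =>
      have : (2*k+1) * 2^(b+1) = 2 * ((2*k+1) * 2^b) := by ring
      rw [this, lowb_two_mul _ (by positivity), ih, pow_succ]
      ring

theorem exists_decomp (n : Nat) (h : 0 < n) : ∃ k a, n = (2*k+1) * 2^a := by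
  obtain ⟨a, m, hm, hn⟩ := Nat.exists_eq_two_pow_mul_odd (n := n) (by omega)
  obtain ⟨k, hk⟩ := hm
  exact ⟨k, a, by rw [hn, hk]; ring⟩

theorem lowb_pos_le (n : Nat) (h : 0 < n) : 0 < lowb n ∧ lowb n ≤ n := by
  obtain ⟨k, a, rfl⟩ := exists_decomp n h
  rw [lowb_odd_mul_pow]
  constructor
  · positivity
  · nlinarith [Nat.one_le_two_pow (n := a)]

theorem pyLowbit_natCast (n : Nat) (h : 0 < n) : pyLowbit (n:Int) = (lowb n : Int) := by
  unfold pyLowbit PySem.Int.band lowb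
  rw [if_pos (by positivity), if_neg (by omega)]
  have h1 : ((n:Int)).toNat = n := Int.toNat_natCast n
  have h2 : (-(-(n:Int)) - 1).toNat = n - 1 := by omega
  rw [h1, h2]

theorem lowb_succ_le (r : Nat) (h : 0 < r) :
    r + lowb r - lowb (r + lowb r) ≤ r - lowb r := by
  obtain ⟨k, a, rfl⟩ := exists_decomp r h
  rw [lowb_odd_mul_pow]
  have hs : (2*k+1) * 2^a + 2^a = (k+1) * 2^(a+1) := by ring
  obtain ⟨k', b, hk'⟩ := exists_decomp (k+1) (by omega)
  have hs2 : (2*k+1) * 2^a + 2^a = (2*k'+1) * 2^(a+1+b) := by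
    rw [hs, hk']; ring
  rw [hs2, lowb_odd_mul_pow, ← hs2]
  have hle : 2 * 2^a ≤ 2^(a+1+b) := by
    calc 2 * 2^a = 2^(a+1) := by ring
    _ ≤ 2^(a+1+b) := Nat.pow_le_pow_right (by norm_num) (by omega)
  have hpos : (0:Nat) < 2^a := by positivity
  omega

theorem lowb_step_le (c i : Nat) (hc : 0 < c) (hci : c < i) (hi : i - lowb i < c) :
    c + lowb c ≤ i := by
  obtain ⟨q, b, rfl⟩ := exists_decomp i (by omega)
  rw [lowb_odd_mul_pow] at hi
  have hb0 : (0:Nat) < 2^b := by positivity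
  have hid : (2*q+1)*2^b = 2*q*2^b + 2^b := by ring
  set s : Nat := c - 2*q*2^b with hs
  have hsb : 0 < s ∧ s < 2^b := by omega
  obtain ⟨c', e, hsd⟩ := exists_decomp s hsb.1
  have heb : e < b := by
    by_contra hh
    have h1 : 2^b ≤ 2^e := Nat.pow_le_pow_right (by norm_num) (by omega)
    have h2 : 2^e ≤ (2*c'+1) * 2^e := by nlinarith
    omega
  have hpow : (2:Nat)^b = 2^(b-e) * 2^e := by
    rw [← pow_add]; congr 1; omega
  have hpow2 : (2:Nat)^(b-e) = 2 * 2^(b-e-1) := by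
    rw [← pow_succ']; congr 1; omega
  have hcform : c = (2*(q*2^(b-e) + c') + 1) * 2^e := by
    have h3 : c = 2*q*2^b + s := by omega
    rw [h3, hsd, hpow]; ring
  have hlc : lowb c = 2^e := by rw [hcform, lowb_odd_mul_pow]
  have hlt : 2*c' + 1 < 2^(b-e) := by
    have h1 : (2*c'+1) * 2^e < 2^(b-e) * 2^e := by rw [← hsd, ← hpow]; exact hsb.2
    exact lt_of_mul_lt_mul_right h1 (Nat.zero_le _)
  have hle2 : (2*c'+2) * 2^e ≤ 2^b := by
    rw [hpow]
    have h4 : 2*c'+2 ≤ 2^(b-e) := by omega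
    exact Nat.mul_le_mul_right _ h4
  have hsum : c + lowb c = 2*q*2^b + ((2*c'+1)*2^e + 2^e) := by
    rw [hlc]
    have h5 : c = 2*q*2^b + (2*c'+1)*2^e := by rw [hcform, hpow]; ring
    omega
  have hW : (2*c'+2)*2^e = (2*c'+1)*2^e + 2^e := by ring
  omega

def chain (m : Nat) : Nat → Nat → List Nat
  | 0, _ => []
  | fuel+1, c => if c ≤ m then c :: chain m fuel (c + lowb c) else []

theorem chain_sound (m : Nat) : ∀ fuel c, 0 < c → ∀ i ∈ chain m fuel c,
    c ≤ i ∧ i ≤ m ∧ i - lowb i ≤ c - lowb c := by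
  intro fuel
  induction fuel with
  | zero => intro c _ i hi; simp [chain] at hi
  | succ f ih =>
      intro c hc i hi
      unfold chain at hi
      split at hi
      · rcases List.mem_cons.mp hi with rfl | hi'
        · omega
        · have hlb := lowb_pos_le c hc
          have h2 := ih (c + lowb c) (by omega) i hi'
          have h3 := lowb_succ_le c hc
          omega
      · simp at hi

theorem chain_mem_of (m fuel c i : Nat) (hc : 0 < c) (h : i ∈ chain m fuel c) :
    c ≤ i ∧ i ≤ m ∧ i - lowb i < c := by
  have hs := chain_sound m fuel c hc i h
  have hlb := lowb_pos_le c hc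
  omega

theorem chain_mem_of_cond (m : Nat) : ∀ fuel c, 0 < c → m + 1 ≤ fuel + c →
    ∀ i, c ≤ i → i ≤ m → i - lowb i < c → i ∈ chain m fuel c := by
  intro fuel
  induction fuel with
  | zero => intro c hc hf i h1 h2 h3; exfalso; omega
  | succ f ih =>
      intro c hc hf i h1 h2 h3
      have hlb := lowb_pos_le c hc
      unfold chain
      rw [if_pos (by omega : c ≤ m)]
      by_cases hic : i = c
      · exact hic ▸ List.mem_cons_self
      · exact List.mem_cons_of_mem _
          (ih (c + lowb c) (by omega) (by omega) i
            (lowb_step_le c i hc (by omega) h3) h2 (by omega))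

theorem chain_pairwise (m : Nat) : ∀ fuel c, 0 < c → (chain m fuel c).Pairwise (· < ·) := by
  intro fuel
  induction fuel with
  | zero => intro c _; simp [chain]
  | succ f ih =>
      intro c hc
      have hlb := lowb_pos_le c hc
      unfold chain
      split
      · refine List.Pairwise.cons ?_ (ih (c + lowb c) (by omega))
        intro i hi
        have := chain_sound m f (c + lowb c) (by omega) i hi
        omega
      · exact List.Pairwise.nil

def applyIncs (bit : List Int) (l : List Nat) : List Int :=
  l.foldl (fun b i => b.set i (b.getD i 0 + 1)) bit

theorem applyIncs_length (l : List Nat) : ∀ bit, (applyIncs bit l).length = bit.length := by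
  induction l with
  | nil => intro bit; rfl
  | cons c t ih => intro bit; simp only [applyIncs, List.foldl_cons] at *; rw [ih]; simp

theorem applyIncs_getD (l : List Nat) : ∀ bit, l.Nodup → (∀ i ∈ l, i < bit.length) →
    ∀ j, j < bit.length →
    (applyIncs bit l).getD j 0 = bit.getD j 0 + (if j ∈ l then 1 else 0) := by
  induction l with
  | nil => intro bit _ _ j _; simp [applyIncs]
  | cons c t ih =>
      intro bit hnd hlt j hj
      have hc : c < bit.length := hlt c (by simp)
      obtain ⟨hcnot, hndt⟩ := List.nodup_cons.mp hnd
      have hgd : ∀ x, (bit.set c (bit.getD c 0 + 1)).getD x 0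
          = bit.getD x 0 + (if x = c then 1 else 0) := by
        intro x
        by_cases hxc : x = c
        · subst hxc
          simp [List.getD_eq_getElem?_getD, List.getElem?_set_self hc]
        · simp [List.getD_eq_getElem?_getD,
            List.getElem?_set_ne (fun h => hxc h.symm), hxc]
      rw [show applyIncs bit (c :: t) = applyIncs (bit.set c (bit.getD c 0 + 1)) t from rfl,
        ih _ hndt (fun i hi => by simpa using hlt i (List.mem_cons_of_mem _ hi)) j (by simpa using hj),
        hgd j]
      by_cases hjc : j = c
      · subst hjc; simp [hcnot]
      · simp [hjc, List.mem_cons]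

def goodBit (m : Nat) (S : List Nat) (bit : List Int) : Prop :=
  bit.length = m + 2 ∧ (∀ x ∈ S, 1 ≤ x ∧ x ≤ m) ∧
  ∀ i : Nat, 1 ≤ i → i ≤ m →
    bit.getD i 0 = (S.countP (fun x => decide (i - lowb i < x) && decide (x ≤ i)) : Int)

theorem cnt_split (S : List Nat) (l k : Nat) (h : l ≤ k) :
    S.countP (fun x => decide (l < x) && decide (x ≤ k)) + S.countP (fun x => decide (x ≤ l))
      = S.countP (fun x => decide (x ≤ k)) := by
  induction S with
  | nil => simp
  | cons a t ih =>
      simp only [List.countP_cons]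
      by_cases h1 : a ≤ k <;> by_cases h2 : a ≤ l <;>
        [skip; skip; skip; skip] <;>
        · have h3 : (l < a) ↔ ¬ (a ≤ l) := by omega
          simp [h1, h2, h3] <;> omega

theorem pyGetD_natCast' (xs : List Int) (n : Nat) (d : Int) :
    PySem.List.pyGetD xs (n : Int) d = xs.getD n d := by
  simp [PySem.List.pyGetD_natCast]

theorem queryGo_eq (m : Nat) (S : List Nat) (bit : List Int) (good : goodBit m S bit) :
    ∀ k, k ≤ m → ∀ fuel, k ≤ fuel → ∀ res,
      bitQueryGo fuel bit res (k : Int) = res + (S.countP (fun x => decide (x ≤ k)) : Int) := by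
  intro k
  induction k using Nat.strong_induction_on with
  | _ k IH =>
      intro hk fuel hf res
      by_cases hk0 : k = 0
      · subst hk0
        have hz : S.countP (fun x => decide (x ≤ 0)) = 0 := by
          rw [List.countP_eq_zero]
          intro x hx
          have := good.2.1 x hx
          simp; omega
        have hz2 : ¬ ((0:Nat):Int) > 0 := by simp
        cases fuel <;> simp [bitQueryGo, hz, hz2] <;> (intro a ha; have := good.2.1 a ha; omega)
      · obtain ⟨f, rfl⟩ : ∃ f, fuel = f + 1 := ⟨fuel - 1, by omega⟩
        have hkpos : 0 < k := by omega
        have hlb := lowb_pos_le k hkpos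
        unfold bitQueryGo
        rw [if_pos (by positivity : (k:Int) > 0), pyGetD_natCast',
          pyLowbit_natCast k hkpos,
          show (k:Int) - (lowb k : Int) = ((k - lowb k : Nat) : Int) by omega,
          IH (k - lowb k) (by omega) (by omega) f (by omega)]
        rw [good.2.2 k (by omega) hk]
        have := cnt_split S (k - lowb k) k (by omega)
        push_cast
        omega

theorem query_eq (m : Nat) (S : List Nat) (bit : List Int) (good : goodBit m S bit)
    (k : Nat) (hk : k ≤ m) :
    bitQueryGo ((k:Int).toNat + 1) bit 0 (k : Int)
      = (S.countP (fun x => decide (x ≤ k)) : Int) := by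
  rw [queryGo_eq m S bit good k hk ((k:Int).toNat + 1) (by simp) 0]
  simp

theorem updateGo_eq_applyIncs (m : Nat) : ∀ fuel (bit : List Int) (c : Nat), 0 < c →
    bitUpdateGo (m : Int) fuel bit (c : Int) = applyIncs bit (chain m fuel c) := by
  intro fuel
  induction fuel with
  | zero => intro bit c _; rfl
  | succ f ih =>
      intro bit c hc
      have hlb := lowb_pos_le c hc
      unfold bitUpdateGo chain
      by_cases hcm : c ≤ m
      · rw [if_pos (by exact_mod_cast hcm), if_pos hcm]
        rw [PySem.List.pySetD_natCast, pyGetD_natCast', pyLowbit_natCast c hc,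
          show (c:Int) + (lowb c : Int) = ((c + lowb c : Nat) : Int) by omega,
          ih _ (c + lowb c) (by omega)]
        rfl
      · rw [if_neg (by exact_mod_cast hcm), if_neg hcm]
        rfl

theorem update_good (m : Nat) (S : List Nat) (bit : List Int) (good : goodBit m S bit)
    (r : Nat) (hr : 1 ≤ r) (hrm : r ≤ m) :
    goodBit m (r :: S) (bitUpdateGo (m : Int) (((m:Int) - (r:Int) + 1).toNat) bit (r : Int)) := by
  have hfuel : ((m:Int) - (r:Int) + 1).toNat = m + 1 - r := by omega
  rw [updateGo_eq_applyIncs m _ bit r (by omega)]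
  set ch := chain m (((m:Int) - (r:Int) + 1).toNat) r with hch
  have hmem : ∀ i, i ∈ ch ↔ (r ≤ i ∧ i ≤ m ∧ i - lowb i < r) := by
    intro i
    constructor
    · exact chain_mem_of m _ r i (by omega)
    · rintro ⟨h1, h2, h3⟩
      exact chain_mem_of_cond m _ r (by omega) (by omega) i h1 h2 h3
  have hlen := good.1
  have hbound : ∀ i ∈ ch, i < bit.length := by
    intro i hi
    have := (hmem i).mp hi
    omega
  have hnd : ch.Nodup := (chain_pairwise m _ r (by omega)).nodup
  refine ⟨by rw [applyIncs_length]; exact good.1, ?_, ?_⟩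
  · intro x hx
    rcases List.mem_cons.mp hx with rfl | hx'
    · omega
    · exact good.2.1 x hx'
  · intro i h1 h2
    rw [applyIncs_getD ch bit hnd hbound i (by omega), good.2.2 i h1 h2,
      List.countP_cons]
    have hiff := hmem i
    by_cases hc2 : i - lowb i < r ∧ r ≤ i
    · have hin : i ∈ ch := hiff.mpr ⟨hc2.2, h2, hc2.1⟩
      rw [if_pos hin, if_pos (by simp only [Bool.and_eq_true, decide_eq_true_eq]; exact hc2)]
      push_cast; ring
    · have hin : i ∉ ch := fun hmm => hc2 ⟨(hiff.mp hmm).2.2, (hiff.mp hmm).1⟩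
      rw [if_neg hin, if_neg (by simp only [Bool.and_eq_true, decide_eq_true_eq]; exact hc2)]
      push_cast; ring

def rankDict (u : List Int) : PySem.Dict Int Int :=
  (PySem.List.enumerate u 0).foldl (fun d p => d.insert p.2 (p.1 + 1)) PySem.Dict.empty

theorem rankDict_getD (u : List Int) (hnd : u.Nodup) (x : Int) (hx : x ∈ u) :
    (rankDict u).getD x 0 = ((u.idxOf x : Nat) : Int) + 1 := by
  have hitems : (rankDict u).items
      = [] ++ (PySem.List.enumerate u 0).map (fun p => (p.2, p.1 + 1)) := by
    exact PySem.Dict.items_foldl_insert_fresh (PySem.List.enumerate u 0)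
      (fun p => p.2) (fun p => p.1 + 1) PySem.Dict.empty
      (fun a _ => PySem.Dict.contains_empty _)
      (by rw [PySem.List.map_snd_enumerate]; exact hnd)
  have hj : u.idxOf x < u.length := List.idxOf_lt_length_of_mem hx
  have hmem : (x, ((u.idxOf x : Nat) : Int) + 1) ∈ (rankDict u).items := by
    rw [hitems]
    simp only [List.nil_append]
    refine List.mem_map.mpr ⟨((u.idxOf x : Nat), x), ?_, by simp⟩
    rw [PySem.List.mem_enumerate_iff]
    exact ⟨u.idxOf x, hj, by simp [List.getElem_idxOf hj]⟩
  have hkeys : (rankDict u).keys.Nodup :=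
    PySem.Dict.nodup_keys_foldl_insert_key (PySem.List.enumerate u 0)
      (fun p => p.2) (fun _ p => p.1 + 1) PySem.Dict.empty (by simp)
  exact PySem.Dict.getD_of_mem_items _ hmem hkeys 0

theorem idxOf_lt_iff (u : List Int) (hp : u.Pairwise (· < ·)) :
    ∀ x ∈ u, ∀ y ∈ u, (x < y ↔ u.idxOf x < u.idxOf y) := by
  induction u with
  | nil => simp
  | cons a t ih =>
      have ha : ∀ z ∈ t, a < z := (List.pairwise_cons.mp hp).1
      have hpt := (List.pairwise_cons.mp hp).2
      intro x hx y hy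
      rcases List.mem_cons.mp hx with rfl | hx'
      · rcases List.mem_cons.mp hy with rfl | hy'
        · simp
        · have hxy : x < y := ha y hy'
          have hne : (x == y) = false := by simp; omega
          simp [List.idxOf_cons, hne, hxy]
      · have hax : a < x := ha x hx'
        have hne : (a == x) = false := by simp; omega
        rcases List.mem_cons.mp hy with rfl | hy'
        · simp [List.idxOf_cons, hne]
          omega
        · have hay : a < y := ha y hy'
          have hne2 : (a == y) = false := by simp; omega
          simp [List.idxOf_cons, hne, hne2]
          rw [ih hpt x hx' y hy']

theorem foldl_count (v : Int) (l : List Int) : ∀ a : Int,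
    l.foldl (fun acc y => if v < y then acc + 1 else acc) a
      = a + (l.countP (fun y => decide (v < y)) : Int) := by
  induction l with
  | nil => intro a; simp
  | cons b t ih =>
      intro a
      simp only [List.foldl_cons, List.countP_cons]
      by_cases hb : v < b <;> simp [hb, ih] <;> push_cast <;> ring

theorem alt_eq_map (arr : List Int) :
    (PySem.List.enumerate arr 0).map (fun p =>
      (PySem.List.slice arr (some (p.1 + 1)) none).foldl
        (fun acc y => if p.2 < y then acc + 1 else acc) 0)
    = (List.range arr.length).map (fun j =>
        ((arr.drop (j+1)).countP (fun y => decide (arr.getD j 0 < y)) : Int)) := by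
  apply List.ext_getElem
  · simp [PySem.List.length_enumerate]
  · intro k h1 h2
    simp only [List.getElem_map, List.getElem_range]
    rw [PySem.List.getElem_enumerate arr 0 k (by simpa using h1)]
    have hk : k < arr.length := by simpa using h1
    have hc : (0 : Int) + (k : Int) + 1 = ((k + 1 : Nat) : Int) := by push_cast; ring
    rw [hc, PySem.List.slice_from_natCast, foldl_count]
    have : arr.getD k 0 = arr[k] := by
      simp [List.getD_eq_getElem?_getD, List.getElem?_eq_getElem hk]
    rw [this]
    push_cast; ring

theorem drop_set_self (l : List Int) (k : Nat) (q : Int) (h : k < l.length) :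
    (l.set k q).drop k = q :: l.drop (k+1) := by
  rw [List.set_eq_take_append_cons_drop]
  simp [h]
  rw [List.drop_append_of_le_length (by simp; omega)]
  simp [h]

theorem qval (u suf : List Int) (hp : u.Pairwise (· < ·)) (hsub : ∀ y ∈ suf, y ∈ u)
    (x : Int) (hx : x ∈ u) (bit : List Int)
    (good : goodBit u.length (suf.map (fun y => u.idxOf y + 1)) bit) :
    bitQueryRange bit ((((u.idxOf x + 1 : Nat)) : Int) + 1) ((u.length : Nat) : Int)
      = (suf.countP (fun y => decide (x < y)) : Int) := by
  unfold bitQueryRange bitQuery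
  have h1 : (((u.idxOf x + 1 : Nat) : Int) + 1 - 1) = ((u.idxOf x + 1 : Nat) : Int) := by ring
  rw [h1, query_eq u.length _ bit good u.length (le_refl _),
    query_eq u.length _ bit good (u.idxOf x + 1)
      (by have := List.idxOf_lt_length_of_mem hx; omega)]
  set S := suf.map (fun y => u.idxOf y + 1) with hS
  have hall : S.countP (fun t => decide (t ≤ u.length)) = S.length := by
    rw [List.countP_eq_length]
    intro t ht
    have := good.2.1 t ht
    simp; omega
  have hmap : S.countP (fun t => decide (t ≤ u.idxOf x + 1))
      = suf.countP (fun y => !(decide (x < y))) := by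
    rw [hS, List.countP_map]
    apply List.countP_congr
    intro y hy
    have hiff := idxOf_lt_iff u hp x hx y (hsub y hy)
    simp [Function.comp]
    omega
  have hlen : S.length = suf.length := by simp [hS]
  have hsplit := List.length_eq_countP_add_countP (fun y => decide (x < y)) (l := suf)
  have hnot : suf.countP (fun a => decide ¬(decide (x < a)) = true)
      = suf.countP (fun y => !(decide (x < y))) := by
    apply List.countP_congr; intro y hy; simp
  rw [hall, hmap]
  rw [hnot] at hsplit
  have := hlen
  push_cast
  omega

theorem loopA_eq (arr u : List Int) (hp : u.Pairwise (· < ·))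
    (hmemu : ∀ x : Int, x ∈ arr → x ∈ u) :
    ∀ (pre suf bit result : List Int),
    arr = pre ++ suf →
    result.length = arr.length →
    goodBit u.length (suf.map (fun y => u.idxOf y + 1)) bit →
    ((PySem.List.pyRange (((pre.length : Nat) : Int) - 1) (-1) (-1)).foldl
      (fun st i =>
        (bitUpdate ((u.length : Nat) : Int) st.1
           ((rankDict u).getD (PySem.List.pyGetD arr i 0) 0),
         PySem.List.pySetD st.2 i
           (bitQueryRange st.1 ((rankDict u).getD (PySem.List.pyGetD arr i 0) 0 + 1)
             ((u.length : Nat) : Int))))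
      (bit, result)).2
    = (List.range pre.length).map (fun j =>
        ((arr.drop (j+1)).countP (fun y => decide (arr.getD j 0 < y)) : Int))
      ++ result.drop pre.length := by
  intro pre
  induction pre using List.reverseRecOn with
  | nil =>
      intro suf bit result harr hlen good
      rw [PySem.List.pyRange_neg_one_eq_nil (by norm_num)]
      simp
  | append_singleton p x ih =>
      intro suf bit result harr hlen good
      have hlp : ((p ++ [x]).length : Int) - 1 = ((p.length : Nat) : Int) := by simp
      rw [hlp, PySem.List.pyRange_neg_one_cons (by omega)]
      rw [List.foldl_cons]
      have harr2 : arr = p ++ (x :: suf) := by simpa using harr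
      have hxarr : x ∈ arr := by rw [harr2]; simp
      have hxu : x ∈ u := hmemu x hxarr
      have hkv : u.idxOf x < u.length := List.idxOf_lt_length_of_mem hxu
      have hget : PySem.List.pyGetD arr ((p.length : Nat) : Int) 0 = x := by
        rw [pyGetD_natCast', List.getD_eq_getElem?_getD, harr2,
          List.getElem?_append_right (le_refl _)]
        simp
      have hrk : (rankDict u).getD x 0 = (((u.idxOf x + 1 : Nat)) : Int) := by
        rw [rankDict_getD u hp.nodup x hxu]; push_cast; ring
      have hq : bitQueryRange bit ((rankDict u).getD (PySem.List.pyGetD arr ((p.length : Nat) : Int) 0) 0 + 1) ((u.length : Nat) : Int)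
          = ((x :: suf).tail.countP (fun y => decide (x < y)) : Int) := by
        rw [hget, hrk]
        exact qval u suf hp (fun y hy => hmemu y (by rw [harr2]; simp [hy])) x hxu bit good
      have hupd : bitUpdate ((u.length : Nat) : Int) bit
          ((rankDict u).getD (PySem.List.pyGetD arr ((p.length : Nat) : Int) 0) 0)
          = bitUpdateGo ((u.length : Nat) : Int)
              (((u.length : Nat) : Int) - ((u.idxOf x + 1 : Nat) : Int) + 1).toNat bit
              ((u.idxOf x + 1 : Nat) : Int) := by
        rw [hget, hrk]; rfl
      have good' : goodBit u.length ((x :: suf).map (fun y => u.idxOf y + 1))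
          (bitUpdate ((u.length : Nat) : Int) bit
            ((rankDict u).getD (PySem.List.pyGetD arr ((p.length : Nat) : Int) 0) 0)) := by
        rw [hupd]
        exact update_good u.length _ bit good (u.idxOf x + 1) (by omega) (by omega)
      have hplen : p.length < result.length := by
        rw [hlen, harr2]; simp
      set R := (rankDict u).getD (PySem.List.pyGetD arr ((p.length : Nat) : Int) 0) 0 with hR
      set Q := bitQueryRange bit (R + 1) ((u.length : Nat) : Int) with hQ
      rw [PySem.List.pySetD_natCast result p.length Q]
      rw [ih (x :: suf) _ (result.set p.length Q) harr2 (by simp [hlen]) good']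
      rw [drop_set_self result p.length Q hplen, hq]
      have h1 : arr.drop (p.length + 1) = suf := by
        rw [harr2, show p ++ (x :: suf) = (p ++ [x]) ++ suf by simp,
          show p.length + 1 = (p ++ [x]).length by simp, List.drop_left]
      have h2 : arr[p.length]?.getD 0 = x := by
        rw [harr2, List.getElem?_append_right (le_refl _)]; simp
      simp only [List.length_append, List.length_singleton, List.range_succ, List.map_append,
        List.map_cons, List.map_nil]
      rw [List.append_assoc]
      congr 1
      simp [h1, h2, List.getD_eq_getElem?_getD]

theorem main_eq (arr : List Int) : find_surpasser_binary_indexed_tree arr = find_surpasser_binary_indexed_tree_alt arr := by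
  by_cases h : arr = []
  · subst h; rfl
  · unfold find_surpasser_binary_indexed_tree
    rw [if_neg h]
    simp only []
    set u := PySem.List.sorted (PySem.Set.ofList arr) (fun x => x) false with hu
    have hp : u.Pairwise (· < ·) := PySem.List.sorted_ofList_pairwise_lt arr
    have hmemu : ∀ x : Int, x ∈ arr → x ∈ u := by
      intro x hx
      rw [hu, PySem.List.mem_sorted]
      exact (PySem.Set.mem_ofList arr x).mpr hx
    have hrd : ((PySem.List.enumerate u 0).foldl
        (fun d p => d.insert p.2 (p.1 + 1)) PySem.Dict.empty) = rankDict u := rfl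
    rw [hrd]
    have htn : ((u.length : Int)).toNat = u.length := Int.toNat_natCast _
    rw [htn]
    have good0 : goodBit u.length (([] : List Int).map (fun y => u.idxOf y + 1))
        (List.replicate (u.length + 2) (0 : Int)) := by
      refine ⟨by simp, by simp, ?_⟩
      intro i h1 h2
      have hi2 : i < u.length + 2 := by omega
      simp [List.getD_eq_getElem?_getD, List.getElem?_replicate, hi2]
    rw [loopA_eq arr u hp hmemu arr [] (List.replicate (u.length + 2) (0 : Int))
      (List.replicate arr.length (0 : Int)) (by simp) (by simp) good0]
    rw [show find_surpasser_binary_indexed_tree_alt arr = _ from alt_eq_map arr]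
    simp

-- ===== VERDICT (by name: the statement is the Claim_ definition above) =====
theorem find_surpasser_binary_indexed_tree_spec : Claim_equal_find_surpasser_binary_indexed_tree := by
  intro arr _
  unfold Spec_find_surpasser_binary_indexed_tree
  exact main_eq arr
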